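-- pv_equiv track=rewrite | github.com/albertqu/bridge_settlement | cv_module/edge_detection.py | edge_max_min
-- ===== SOURCE A (Python) =====
-- def edge_max_min(data):
--     # Returns a *safe* edge maxi, mini for the data
--     # TODO: OPTIMIZE THE WIDTH AND VALUE THRESHOLD
--     width_thres = 90
--     value_thres = 20
--     maxi = data[0]
--     max_ind = 0
--     mini = data[0]
--     min_ind = 0
--     for i in range(1, len(data)):
--         target = data[i]
--         if target > maxi:
--             maxi = target
--             max_ind = i
--         if target < mini:
--             mini = target
--             min_ind = i
--     maxi, mini = max_ind, min_ind
--     assert data[maxi] >= value_thres and mini - maxi <= width_thres and maxi < mini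
--     return maxi, mini
-- ===== SOURCE B (Python) =====
-- def edge_max_min(data):
--     # Two idiomatic builtin passes instead of one hand-rolled 4-variable loop.
--     width_thres = 90
--     value_thres = 20
--     max_ind = max(range(len(data)), key=data.__getitem__)
--     min_ind = min(range(len(data)), key=data.__getitem__)
--     assert data[max_ind] >= value_thres and min_ind - max_ind <= width_thres and max_ind < min_ind
--     return max_ind, min_ind
-- ===== Notes on version B (the rewrite author's own statement) =====
-- stated objective: idiomatic
-- what changed: Replaces the single hand-rolled loop that tracks four running variables with two builtin passes (max/min over range(len(data)) keyed by data.__getitem__), which keep the same first-occurrence tie-breaking.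
import Mathlib
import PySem

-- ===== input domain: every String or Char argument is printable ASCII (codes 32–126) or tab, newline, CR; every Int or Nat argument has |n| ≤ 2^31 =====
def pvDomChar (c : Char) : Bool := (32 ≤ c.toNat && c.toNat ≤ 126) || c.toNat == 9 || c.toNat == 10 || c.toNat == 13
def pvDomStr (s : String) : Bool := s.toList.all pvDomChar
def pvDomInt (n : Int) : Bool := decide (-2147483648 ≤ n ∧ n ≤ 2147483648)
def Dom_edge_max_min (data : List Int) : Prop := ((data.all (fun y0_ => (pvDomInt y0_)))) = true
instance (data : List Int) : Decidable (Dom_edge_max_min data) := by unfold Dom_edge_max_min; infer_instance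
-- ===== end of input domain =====

-- B replaces A's single four-variable loop by two separate first-extremal passes
-- (Python max/min over the index range, keyed by the list); same return value (idiomatic, not faster).


-- ===== PORT A =====
-- Literal port of A's single loop over range(1, len(data)) carrying (maxi, max_ind, mini, min_ind).
-- On data = [] Python raises IndexError, and when the final assert fails Python raises
-- AssertionError; both are excluded by Pre_ below (the port returns the tuple anyway there).
def edge_max_min (data : List Int) : Int × Int :=
  match data with
  | [] => (0, 0)          -- data[0] raises IndexError (outside Pre_)
  | d0 :: rest =>
    let st := (PySem.List.pyRange 1 ((d0 :: rest).length : Int) 1).foldl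
      (fun (st : Int × Int × Int × Int) i =>
        let target := PySem.List.pyGetD (d0 :: rest) i 0   -- i ∈ range(1, len): in range
        let st1 := if st.1 < target then (target, i, st.2.2.1, st.2.2.2) else st
        if target < st1.2.2.1 then (st1.1, st1.2.1, target, i) else st1)
      (d0, 0, d0, 0)
    (st.2.1, st.2.2.2)

-- ===== PORT B =====
-- Literal port of B: max/min over range(len(data)) with key data.__getitem__ (first extremal).
def edge_max_min_alt (data : List Int) : Int × Int :=
  let key := fun i => PySem.List.pyGetD data i 0   -- data.__getitem__, indices in range
  let idxs := PySem.List.pyRange 0 (data.length : Int) 1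
  match PySem.List.max? idxs key, PySem.List.min? idxs key with
  | some mi, some ni => (mi, ni)
  | _, _ => (0, 0)        -- only for data = []: Python max() raises (outside Pre_)

-- ===== PRECONDITION & SPEC =====
-- Pre_ holds exactly where A returns normally: nonempty data whose first-argmax index iM and
-- first-argmin index im satisfy the assert (data[iM] ≥ 20, im - iM ≤ 90, iM < im).
def Pre_edge_max_min (data : List Int) : Prop :=
  data ≠ [] ∧
  20 ≤ data.tail.foldl max (data.headD 0) ∧
  ((data.idxOf (data.tail.foldl min (data.headD 0)) : Int)
      - (data.idxOf (data.tail.foldl max (data.headD 0)) : Int) ≤ 90) ∧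
  data.idxOf (data.tail.foldl max (data.headD 0)) < data.idxOf (data.tail.foldl min (data.headD 0))
instance (data : List Int) : Decidable (Pre_edge_max_min data) := by
  unfold Pre_edge_max_min; infer_instance
def pvWitness_edge_max_min : List Int := [20, -1]
def Spec_edge_max_min (data : List Int) (out : Int × Int) : Prop := out = edge_max_min_alt data
instance (data : List Int) (out : Int × Int) : Decidable (Spec_edge_max_min data out) := by unfold Spec_edge_max_min; infer_instance

-- ===== CLAIM (what is proved, stated in full; the proofs are below) =====
def Claim_equal_edge_max_min : Prop := ∀ (data : List Int), Dom_edge_max_min data → Pre_edge_max_min data → Spec_edge_max_min data (edge_max_min data)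

-- ===== LEMMAS AND PROOFS =====

-- A's combined loop body updates the (maxi, max_ind) and (mini, min_ind) halves independently.
theorem pv_fold_splitD (xs l : List Int) (s : Int × Int × Int × Int) :
    l.foldl (fun (st : Int × Int × Int × Int) i =>
        let target := PySem.List.pyGetD xs i 0
        let st1 := if st.1 < target then (target, i, st.2.2.1, st.2.2.2) else st
        if target < st1.2.2.1 then (st1.1, st1.2.1, target, i) else st1) s
    = ((l.foldl (fun (q : Int × Int) i =>
          if q.1 < PySem.List.pyGetD xs i 0 then (PySem.List.pyGetD xs i 0, i) else q) (s.1, s.2.1)).1,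
       (l.foldl (fun (q : Int × Int) i =>
          if q.1 < PySem.List.pyGetD xs i 0 then (PySem.List.pyGetD xs i 0, i) else q) (s.1, s.2.1)).2,
       (l.foldl (fun (q : Int × Int) i =>
          if PySem.List.pyGetD xs i 0 < q.1 then (PySem.List.pyGetD xs i 0, i) else q) (s.2.2.1, s.2.2.2)).1,
       (l.foldl (fun (q : Int × Int) i =>
          if PySem.List.pyGetD xs i 0 < q.1 then (PySem.List.pyGetD xs i 0, i) else q) (s.2.2.1, s.2.2.2)).2) := by
  induction l generalizing s with
  | nil => rfl
  | cons x t ih =>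
    simp only [List.foldl_cons]
    rw [ih]
    split_ifs <;> rfl

-- Python max(range, key): PySem.List.max? over j :: l is A's running-(maxi, max_ind) pair started at j.
theorem pv_max_phaseD (xs l : List Int) :
    ∀ (a j : Int), a = PySem.List.pyGetD xs j 0 →
      (PySem.List.max? (j :: l) (fun i => PySem.List.pyGetD xs i 0)
        = some ((l.foldl (fun (q : Int × Int) i =>
            if q.1 < PySem.List.pyGetD xs i 0 then (PySem.List.pyGetD xs i 0, i) else q) (a, j)).2))
      ∧ (l.foldl (fun (q : Int × Int) i =>
            if q.1 < PySem.List.pyGetD xs i 0 then (PySem.List.pyGetD xs i 0, i) else q) (a, j)).1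
        = PySem.List.pyGetD xs (l.foldl (fun (q : Int × Int) i =>
            if q.1 < PySem.List.pyGetD xs i 0 then (PySem.List.pyGetD xs i 0, i) else q) (a, j)).2 0 := by
  induction l with
  | nil => intro a j hp; exact ⟨by simp [PySem.List.max?], hp⟩
  | cons x t ih =>
    intro a j hp
    have hstep : PySem.List.max? (j :: x :: t) (fun i => PySem.List.pyGetD xs i 0)
        = PySem.List.max? ((if PySem.List.pyGetD xs j 0 < PySem.List.pyGetD xs x 0 then x else j) :: t)
            (fun i => PySem.List.pyGetD xs i 0) := by
      simp only [PySem.List.max?, List.foldl_cons]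
      split_ifs <;> rfl
    by_cases h : a < PySem.List.pyGetD xs x 0
    · have h' : PySem.List.pyGetD xs j 0 < PySem.List.pyGetD xs x 0 := hp ▸ h
      simp only [List.foldl_cons, if_pos h, hstep, if_pos h']
      exact ih (PySem.List.pyGetD xs x 0) x rfl
    · have h' : ¬ PySem.List.pyGetD xs j 0 < PySem.List.pyGetD xs x 0 := hp ▸ h
      simp only [List.foldl_cons, if_neg h, hstep, if_neg h']
      exact ih a j hp

-- Python min(range, key): PySem.List.min? over j :: l is A's running-(mini, min_ind) pair started at j.
theorem pv_min_phaseD (xs l : List Int) :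
    ∀ (a j : Int), a = PySem.List.pyGetD xs j 0 →
      (PySem.List.min? (j :: l) (fun i => PySem.List.pyGetD xs i 0)
        = some ((l.foldl (fun (q : Int × Int) i =>
            if PySem.List.pyGetD xs i 0 < q.1 then (PySem.List.pyGetD xs i 0, i) else q) (a, j)).2))
      ∧ (l.foldl (fun (q : Int × Int) i =>
            if PySem.List.pyGetD xs i 0 < q.1 then (PySem.List.pyGetD xs i 0, i) else q) (a, j)).1
        = PySem.List.pyGetD xs (l.foldl (fun (q : Int × Int) i =>
            if PySem.List.pyGetD xs i 0 < q.1 then (PySem.List.pyGetD xs i 0, i) else q) (a, j)).2 0 := by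
  induction l with
  | nil => intro a j hp; exact ⟨by simp [PySem.List.min?], hp⟩
  | cons x t ih =>
    intro a j hp
    have hstep : PySem.List.min? (j :: x :: t) (fun i => PySem.List.pyGetD xs i 0)
        = PySem.List.min? ((if PySem.List.pyGetD xs x 0 < PySem.List.pyGetD xs j 0 then x else j) :: t)
            (fun i => PySem.List.pyGetD xs i 0) := by
      simp only [PySem.List.min?, List.foldl_cons]
      split_ifs <;> rfl
    by_cases h : PySem.List.pyGetD xs x 0 < a
    · have h' : PySem.List.pyGetD xs x 0 < PySem.List.pyGetD xs j 0 := hp ▸ h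
      simp only [List.foldl_cons, if_pos h, hstep, if_pos h']
      exact ih (PySem.List.pyGetD xs x 0) x rfl
    · have h' : ¬ PySem.List.pyGetD xs x 0 < PySem.List.pyGetD xs j 0 := hp ▸ h
      simp only [List.foldl_cons, if_neg h, hstep, if_neg h']
      exact ih a j hp

-- The two ports agree on every nonempty list.
theorem pv_main (d0 : Int) (rest : List Int) :
    edge_max_min (d0 :: rest) = edge_max_min_alt (d0 :: rest) := by
  have hn : (0 : Int) < ((d0 :: rest).length : Int) := by
    exact_mod_cast Nat.succ_pos rest.length
  have hp0 : d0 = PySem.List.pyGetD (d0 :: rest) (0 : Int) 0 := by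
    simp [PySem.List.pyGetD_zero_cons]
  have hmax := pv_max_phaseD (d0 :: rest)
      (PySem.List.pyRange 1 ((d0 :: rest).length : Int) 1) d0 0 hp0
  have hmin := pv_min_phaseD (d0 :: rest)
      (PySem.List.pyRange 1 ((d0 :: rest).length : Int) 1) d0 0 hp0
  simp only [edge_max_min, edge_max_min_alt, PySem.List.pyRange_one_cons hn, zero_add,
    pv_fold_splitD, hmax.1, hmin.1]

-- ===== VERDICT (by name: the statement is the Claim_ definition above) =====
theorem edge_max_min_spec : Claim_equal_edge_max_min := by
  intro data _ hpre
  unfold Spec_edge_max_min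
  match data with
  | [] => exact absurd rfl hpre.1
  | d0 :: rest => exact pv_main d0 rest
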